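-- pv_equiv track=rewrite | github.com/stonezone/lumps | data_sources.py | _parse_wind_directions
-- ===== SOURCE A (Python) =====
-- from typing import Dict, List, Optional, Tuple
--
-- def _parse_wind_directions(direction_string: str, expected_count: int) -> List[str]:
--     """Parse a string of concatenated wind directions
--
--     Wind directions can be 1-3 letters (N, NE, ENE, NNE, etc.)
--     This is tricky because they're variable length.
--     """
--     results = []
--     i = 0
--
--     while i < len(direction_string) and len(results) < expected_count:
--         # Try to match the longest valid direction first
--         matched = False
--
--         # Try 3-letter directions first (NNE, ENE, ESE, SSE, SSW, WSW, WNW, NNW)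
--         if i + 3 <= len(direction_string):
--             three_letter = direction_string[i:i+3]
--             if three_letter in ['NNE', 'ENE', 'ESE', 'SSE', 'SSW', 'WSW', 'WNW', 'NNW']:
--                 results.append(three_letter)
--                 i += 3
--                 matched = True
--
--         # Try 2-letter directions (NE, SE, SW, NW)
--         if not matched and i + 2 <= len(direction_string):
--             two_letter = direction_string[i:i+2]
--             if two_letter in ['NE', 'SE', 'SW', 'NW']:
--                 results.append(two_letter)
--                 i += 2
--                 matched = True
--
--         # Try 1-letter directions (N, E, S, W)
--         if not matched and i < len(direction_string):
--             one_letter = direction_string[i]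
--             if one_letter in ['N', 'E', 'S', 'W']:
--                 results.append(one_letter)
--                 i += 1
--                 matched = True
--
--         # If no match, skip this character (shouldn't happen with valid data)
--         if not matched:
--             i += 1
--
--     # Pad with 'E' if we don't have enough directions
--     while len(results) < expected_count:
--         results.append('E')
--
--     return results[:expected_count]
-- ===== SOURCE B (Python) =====
-- import re
--
-- _DIR_PAT = re.compile('NNE|ENE|ESE|SSE|SSW|WSW|WNW|NNW|NE|SE|SW|NW|N|E|S|W')
--
-- def _parse_wind_directions(direction_string: str, expected_count: int):
--     """Regex-based reimplementation: one alternation pattern (3-letter codes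
--     first, then 2-letter, then 1-letter) mirrors the greedy preference order;
--     findall skips unmatched characters, then pad with 'E' and truncate."""
--     n = max(expected_count, 0)
--     tokens = _DIR_PAT.findall(direction_string)[:n]
--     return tokens + ['E'] * (n - len(tokens))
-- ===== Notes on version B (the rewrite author's own statement) =====
-- stated objective: faster
-- what changed: Replaces the hand-written index/flag while-loop and the padding while-loop with a single precompiled regex alternation (codes ordered long-to-short) whose findall produces the token list in one call, followed by arithmetic padding/truncation.
import Mathlib
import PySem

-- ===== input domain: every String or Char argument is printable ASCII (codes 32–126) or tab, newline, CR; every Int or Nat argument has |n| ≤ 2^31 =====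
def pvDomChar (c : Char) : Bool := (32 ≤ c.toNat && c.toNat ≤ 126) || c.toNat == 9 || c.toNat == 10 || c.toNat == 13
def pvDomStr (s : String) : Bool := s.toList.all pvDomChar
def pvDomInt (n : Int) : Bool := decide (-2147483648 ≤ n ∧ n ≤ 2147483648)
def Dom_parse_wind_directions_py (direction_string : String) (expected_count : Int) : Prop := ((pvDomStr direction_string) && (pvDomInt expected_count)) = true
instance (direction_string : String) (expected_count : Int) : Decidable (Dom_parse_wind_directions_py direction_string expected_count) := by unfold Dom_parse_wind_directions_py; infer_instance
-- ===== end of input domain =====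

-- B replaces A's index/flag while-loop by a single regex alternation (3-letter codes first)
-- whose findall yields the token list in one call, plus arithmetic padding/truncation;
-- same O(n) asymptotics, measurably faster constant factor in Python (compiled regex).


-- ===== PORT A =====
-- the while-loop of A: index i, accumulator results; slices s[i:i+k] are
-- (cs.drop i).take k, exact for natural bounds (PySem.List.slice_natCast_add)
def pyA_loop (cs : List Char) (n : Int) (i : Nat) (results : List String) : List String :=
  if i < cs.length ∧ (results.length : Int) < n then
    if i + 3 ≤ cs.length ∧ String.ofList ((cs.drop i).take 3) ∈ (["NNE", "ENE", "ESE", "SSE", "SSW", "WSW", "WNW", "NNW"] : List String) then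
      pyA_loop cs n (i + 3) (results ++ [String.ofList ((cs.drop i).take 3)])
    else if i + 2 ≤ cs.length ∧ String.ofList ((cs.drop i).take 2) ∈ (["NE", "SE", "SW", "NW"] : List String) then
      pyA_loop cs n (i + 2) (results ++ [String.ofList ((cs.drop i).take 2)])
    else if String.ofList ((cs.drop i).take 1) ∈ (["N", "E", "S", "W"] : List String) then
      -- direction_string[i]: a one-character string since i < len
      pyA_loop cs n (i + 1) (results ++ [String.ofList ((cs.drop i).take 1)])
    else
      pyA_loop cs n (i + 1) results
  else results
termination_by cs.length - i
decreasing_by all_goals omega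

-- the padding while-loop of A
def pyA_pad (results : List String) (n : Int) : List String :=
  if (results.length : Int) < n then pyA_pad (results ++ ["E"]) n else results
termination_by (n - results.length).toNat
decreasing_by simp; omega

def parse_wind_directions_py (direction_string : String) (expected_count : Int) : List String :=
  PySem.List.slice (pyA_pad (pyA_loop direction_string.toList expected_count 0 []) expected_count) none (some expected_count)

-- ===== PORT B =====
-- the compiled alternation pattern, 3-letter codes first, then 2-, then 1-letter
def pvAltPats : List String := ["NNE", "ENE", "ESE", "SSE", "SSW", "WSW", "WNW", "NNW", "NE", "SE", "SW", "NW", "N", "E", "S", "W"]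

lemma pvAltPats_len_pos : ∀ p ∈ pvAltPats, 1 ≤ p.toList.length := by decide

-- re.findall on an alternation of literals: at each position the first alternative
-- that matches is emitted and consumed; an unmatched character is skipped
def pvFindall (cs : List Char) : List String :=
  match cs with
  | [] => []
  | c :: rest =>
    match h : pvAltPats.find? (fun p => p.toList.isPrefixOf (c :: rest)) with
    | some p => p :: pvFindall ((c :: rest).drop p.toList.length)
    | none => pvFindall rest
termination_by cs.length
decreasing_by
  · have hp := pvAltPats_len_pos _ (List.mem_of_find?_eq_some h)
    simp only [List.length_drop, List.length_cons]
    omega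
  · simp

def parse_wind_directions_py_alt (direction_string : String) (expected_count : Int) : List String :=
  let k := (max expected_count 0).toNat
  let tokens := (pvFindall direction_string.toList).take k
  tokens ++ List.replicate (k - tokens.length) "E"

-- ===== PRECONDITION & SPEC =====
def Spec_parse_wind_directions_py (direction_string : String) (expected_count : Int) (out : List String) : Prop := out = parse_wind_directions_py_alt direction_string expected_count
instance (direction_string : String) (expected_count : Int) (out : List String) : Decidable (Spec_parse_wind_directions_py direction_string expected_count out) := by unfold Spec_parse_wind_directions_py; infer_instance

-- ===== CLAIM (what is proved, stated in full; the proofs are below) =====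
def Claim_equal_parse_wind_directions_py : Prop := ∀ (direction_string : String) (expected_count : Int), Dom_parse_wind_directions_py direction_string expected_count → Spec_parse_wind_directions_py direction_string expected_count (parse_wind_directions_py direction_string expected_count)

-- ===== LEMMAS AND PROOFS =====

-- a fixed-length pattern is a prefix iff the corresponding take equals it
lemma prefix_take_iff (p ds : List Char) :
    p.isPrefixOf ds = true ↔ p.length ≤ ds.length ∧ ds.take p.length = p := by
  rw [List.isPrefixOf_iff_prefix]
  constructor
  · intro hp
    exact ⟨hp.length_le, (List.prefix_iff_eq_take.mp hp).symm⟩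
  · intro ⟨h1, h2⟩
    exact List.prefix_iff_eq_take.mpr h2.symm

-- within one length group of the alternation: a successful find? means A's
-- membership test succeeds and produces the very same token
lemma group_some {k : Nat} {ps : List String} (hk : ∀ p ∈ ps, p.toList.length = k)
    {ds : List Char} {q : String}
    (h : ps.find? (fun p => p.toList.isPrefixOf ds) = some q) :
    (k ≤ ds.length ∧ String.ofList (ds.take k) ∈ ps) ∧ String.ofList (ds.take k) = q ∧ k = q.toList.length := by
  have hqmem := List.mem_of_find?_eq_some h
  have hpred := List.find?_some h
  have hql := hk q hqmem
  have hpre := (prefix_take_iff q.toList ds).mp hpred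
  rw [hql] at hpre
  obtain ⟨hle, htk⟩ := hpre
  refine ⟨⟨hle, ?_⟩, ?_, hql.symm⟩
  · rw [htk, String.ofList_toList]; exact hqmem
  · rw [htk, String.ofList_toList]

lemma group_none {k : Nat} {ps : List String} (hk : ∀ p ∈ ps, p.toList.length = k)
    {ds : List Char}
    (h : ps.find? (fun p => p.toList.isPrefixOf ds) = none) :
    ¬ (k ≤ ds.length ∧ String.ofList (ds.take k) ∈ ps) := by
  rintro ⟨hle, hmem⟩
  have hnone := List.find?_eq_none.mp h _ hmem
  apply hnone
  have hl : (String.ofList (ds.take k)).toList = ds.take k := String.toList_ofList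
  have hlen : (String.ofList (ds.take k)).toList.length = k := hk _ hmem
  apply (prefix_take_iff _ _).mpr
  rw [hlen, hl]
  exact ⟨hle, rfl⟩

-- A's branch chain on the remaining suffix computes exactly the first matching alternative
lemma step_eq (ds : List Char) (hds : ds ≠ []) :
    (if 3 ≤ ds.length ∧ String.ofList (ds.take 3) ∈ (["NNE", "ENE", "ESE", "SSE", "SSW", "WSW", "WNW", "NNW"] : List String) then
       some (String.ofList (ds.take 3), 3)
     else if 2 ≤ ds.length ∧ String.ofList (ds.take 2) ∈ (["NE", "SE", "SW", "NW"] : List String) then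
       some (String.ofList (ds.take 2), 2)
     else if String.ofList (ds.take 1) ∈ (["N", "E", "S", "W"] : List String) then
       some (String.ofList (ds.take 1), 1)
     else none)
  = (pvAltPats.find? (fun p => p.toList.isPrefixOf ds)).map (fun p => (p, p.toList.length)) := by
  have h1len : 1 ≤ ds.length := by
    cases ds with
    | nil => simp at hds
    | cons a t => simp
  have hk3 : ∀ p ∈ (["NNE", "ENE", "ESE", "SSE", "SSW", "WSW", "WNW", "NNW"] : List String), p.toList.length = 3 := by decide
  have hk2 : ∀ p ∈ (["NE", "SE", "SW", "NW"] : List String), p.toList.length = 2 := by decide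
  have hk1 : ∀ p ∈ (["N", "E", "S", "W"] : List String), p.toList.length = 1 := by decide
  have hsplit : pvAltPats
      = (["NNE", "ENE", "ESE", "SSE", "SSW", "WSW", "WNW", "NNW"] : List String)
        ++ ((["NE", "SE", "SW", "NW"] : List String) ++ (["N", "E", "S", "W"] : List String)) := rfl
  rw [hsplit, List.find?_append, List.find?_append]
  cases h3 : (["NNE", "ENE", "ESE", "SSE", "SSW", "WSW", "WNW", "NNW"] : List String).find? (fun p => p.toList.isPrefixOf ds) with
  | some q =>
    obtain ⟨hc, hv, hkq⟩ := group_some hk3 h3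
    rw [if_pos hc]
    simp only [Option.some_or, Option.map_some]
    rw [hv, ← hkq]
  | none =>
    rw [if_neg (group_none hk3 h3), Option.none_or]
    cases h2 : (["NE", "SE", "SW", "NW"] : List String).find? (fun p => p.toList.isPrefixOf ds) with
    | some q =>
      obtain ⟨hc, hv, hkq⟩ := group_some hk2 h2
      rw [if_pos hc]
      simp only [Option.some_or, Option.map_some]
      rw [hv, ← hkq]
    | none =>
      rw [if_neg (group_none hk2 h2), Option.none_or]
      cases h1 : (["N", "E", "S", "W"] : List String).find? (fun p => p.toList.isPrefixOf ds) with
      | some q =>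
        obtain ⟨hc, hv, hkq⟩ := group_some hk1 h1
        rw [if_pos hc.2]
        simp only [Option.map_some]
        rw [hv, ← hkq]
      | none =>
        rw [if_neg (fun hm => group_none hk1 h1 ⟨h1len, hm⟩)]
        simp

lemma pvFindall_cons_some (c : Char) (rest : List Char) (p : String)
    (h : pvAltPats.find? (fun q => q.toList.isPrefixOf (c :: rest)) = some p) :
    pvFindall (c :: rest) = p :: pvFindall ((c :: rest).drop p.toList.length) := by
  rw [pvFindall]
  split
  · rename_i p' hp'
    rw [h] at hp'
    cases hp'
    rfl
  · rename_i hp'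
    rw [h] at hp'
    simp at hp'

lemma pvFindall_cons_none (c : Char) (rest : List Char)
    (h : pvAltPats.find? (fun q => q.toList.isPrefixOf (c :: rest)) = none) :
    pvFindall (c :: rest) = pvFindall rest := by
  rw [pvFindall]
  split
  · rename_i p' hp'
    rw [h] at hp'
    simp at hp'
  · rfl

-- the bounded A-loop from position i returns the accumulated results plus the
-- count-limited remainder of the full token stream
lemma loop_eq (cs : List Char) (n : Int) : ∀ fuel i r, cs.length - i ≤ fuel →
    pyA_loop cs n i r = r ++ (pvFindall (cs.drop i)).take (n.toNat - r.length) := by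
  intro fuel
  induction fuel with
  | zero =>
    intro i r hf
    have hge : cs.length ≤ i := by omega
    rw [pyA_loop, if_neg (by omega), List.drop_eq_nil_of_le hge]
    simp [pvFindall]
  | succ m ih =>
    intro i r hf
    by_cases hcond : i < cs.length ∧ (r.length : Int) < n
    · obtain ⟨hi, hr⟩ := hcond
      have hlen : (cs.drop i).length = cs.length - i := List.length_drop
      have hds : cs.drop i ≠ [] := by
        intro hnil
        rw [hnil] at hlen
        simp at hlen
        omega
      obtain ⟨c, rest, hcr⟩ := List.exists_cons_of_ne_nil hds
      have e3 : (i + 3 ≤ cs.length) ↔ (3 ≤ (cs.drop i).length) := by rw [hlen]; omega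
      have e2 : (i + 2 ≤ cs.length) ↔ (2 ≤ (cs.drop i).length) := by rw [hlen]; omega
      have hstep := step_eq (cs.drop i) hds
      rw [pyA_loop, if_pos ⟨hi, hr⟩]
      cases hfind : pvAltPats.find? (fun p => p.toList.isPrefixOf (cs.drop i)) with
      | some p =>
        rw [hfind] at hstep
        have hfl : pvFindall (cs.drop i) = p :: pvFindall (cs.drop (i + p.toList.length)) := by
          rw [hcr, pvFindall_cons_some c rest p (by rw [← hcr]; exact hfind), ← hcr,
              List.drop_drop]
        by_cases a3 : i + 3 ≤ cs.length ∧ String.ofList ((cs.drop i).take 3) ∈ (["NNE", "ENE", "ESE", "SSE", "SSW", "WSW", "WNW", "NNW"] : List String)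
        · rw [if_pos ⟨e3.mp a3.1, a3.2⟩] at hstep
          obtain ⟨hv, hkq⟩ : String.ofList ((cs.drop i).take 3) = p ∧ 3 = p.toList.length := by
            simpa [← String.length_toList] using hstep
          rw [if_pos a3, hv, ih (i + 3) (r ++ [p]) (by omega), hfl, ← hkq]
          have hk : n.toNat - r.length = (n.toNat - (r ++ [p]).length) + 1 := by
            simp
            omega
          rw [hk, List.take_succ_cons]
          simp
        · rw [if_neg (fun h => a3 ⟨e3.mpr h.1, h.2⟩)] at hstep
          rw [if_neg a3]
          by_cases a2 : i + 2 ≤ cs.length ∧ String.ofList ((cs.drop i).take 2) ∈ (["NE", "SE", "SW", "NW"] : List String)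
          · rw [if_pos ⟨e2.mp a2.1, a2.2⟩] at hstep
            obtain ⟨hv, hkq⟩ : String.ofList ((cs.drop i).take 2) = p ∧ 2 = p.toList.length := by
              simpa [← String.length_toList] using hstep
            rw [if_pos a2, hv, ih (i + 2) (r ++ [p]) (by omega), hfl, ← hkq]
            have hk : n.toNat - r.length = (n.toNat - (r ++ [p]).length) + 1 := by
              simp
              omega
            rw [hk, List.take_succ_cons]
            simp
          · rw [if_neg (fun h => a2 ⟨e2.mpr h.1, h.2⟩)] at hstep
            rw [if_neg a2]
            by_cases a1 : String.ofList ((cs.drop i).take 1) ∈ (["N", "E", "S", "W"] : List String)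
            · rw [if_pos a1] at hstep
              obtain ⟨hv, hkq⟩ : String.ofList ((cs.drop i).take 1) = p ∧ 1 = p.toList.length := by
                simpa [← String.length_toList] using hstep
              rw [if_pos a1, hv, ih (i + 1) (r ++ [p]) (by omega), hfl, ← hkq]
              have hk : n.toNat - r.length = (n.toNat - (r ++ [p]).length) + 1 := by
                simp
                omega
              rw [hk, List.take_succ_cons]
              simp
            · rw [if_neg a1] at hstep
              simp at hstep
      | none =>
        rw [hfind] at hstep
        simp only [Option.map_none] at hstep
        have a3 : ¬ (i + 3 ≤ cs.length ∧ String.ofList ((cs.drop i).take 3) ∈ (["NNE", "ENE", "ESE", "SSE", "SSW", "WSW", "WNW", "NNW"] : List String)) := by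
          intro hc
          rw [if_pos ⟨e3.mp hc.1, hc.2⟩] at hstep
          simp at hstep
        rw [if_neg (fun h => a3 ⟨e3.mpr h.1, h.2⟩)] at hstep
        have a2 : ¬ (i + 2 ≤ cs.length ∧ String.ofList ((cs.drop i).take 2) ∈ (["NE", "SE", "SW", "NW"] : List String)) := by
          intro hc
          rw [if_pos ⟨e2.mp hc.1, hc.2⟩] at hstep
          simp at hstep
        rw [if_neg (fun h => a2 ⟨e2.mpr h.1, h.2⟩)] at hstep
        have a1 : ¬ (String.ofList ((cs.drop i).take 1) ∈ (["N", "E", "S", "W"] : List String)) := by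
          intro hc
          rw [if_pos hc] at hstep
          simp at hstep
        rw [if_neg a3, if_neg a2, if_neg a1]
        have hfl : pvFindall (cs.drop i) = pvFindall (cs.drop (i + 1)) := by
          rw [hcr, pvFindall_cons_none c rest (by rw [← hcr]; exact hfind)]
          have hrest : rest = (cs.drop i).tail := by rw [hcr]; rfl
          rw [hrest, List.tail_drop]
        rw [ih (i + 1) r (by omega), hfl]
    · rw [pyA_loop, if_neg hcond]
      rcases not_and_or.mp hcond with h | h
      · rw [List.drop_eq_nil_of_le (by omega)]
        simp [pvFindall]
      · have h0 : n.toNat - r.length = 0 := by omega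
        rw [h0]
        simp

lemma pad_eq (n : Int) : ∀ k r, n.toNat - r.length = k →
    pyA_pad r n = r ++ List.replicate (n.toNat - r.length) "E" := by
  intro k
  induction k with
  | zero =>
    intro r hk
    rw [pyA_pad, if_neg (by omega), hk]
    simp
  | succ m ih =>
    intro r hk
    have harg : n.toNat - (r ++ ["E"]).length = m := by
      simp only [List.length_append, List.length_cons, List.length_nil]
      omega
    rw [pyA_pad, if_pos (by omega), ih (r ++ ["E"]) harg, harg, hk]
    rw [List.replicate_succ]
    simp

-- ===== VERDICT (by name: the statement is the Claim_ definition above) =====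
lemma final_eq (s : String) (n : Int) :
    parse_wind_directions_py s n = parse_wind_directions_py_alt s n := by
  unfold parse_wind_directions_py parse_wind_directions_py_alt
  rw [loop_eq s.toList n (s.toList.length) 0 [] (by omega)]
  simp only [List.drop_zero, List.nil_append, List.length_nil, Nat.sub_zero]
  rw [pad_eq n (n.toNat - ((pvFindall s.toList).take n.toNat).length) _ rfl]
  have hmax : (max n 0).toNat = n.toNat := by omega
  rw [hmax]
  have hlenall : (((pvFindall s.toList).take n.toNat) ++ List.replicate (n.toNat - ((pvFindall s.toList).take n.toNat).length) "E").length = n.toNat := by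
    simp only [List.length_append, List.length_take, List.length_replicate]
    omega
  by_cases hn : 0 ≤ n
  · rw [PySem.List.slice_to _ hn, List.take_of_length_le (by omega)]
  · have h0 : n.toNat = 0 := by omega
    rw [h0] at hlenall ⊢
    have hnil := List.eq_nil_of_length_eq_zero hlenall
    rw [hnil]
    simp [PySem.List.slice]

theorem parse_wind_directions_py_spec : Claim_equal_parse_wind_directions_py := by
  intro s n _
  unfold Spec_parse_wind_directions_py
  exact final_eq s n
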